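-- pv_equiv track=rewrite | github.com/acmfi/AdventCode | 2019/day20/skgsergio/queputapereza.py | generate_shitty_graph_p2
-- ===== SOURCE A (Python) =====
-- def generate_shitty_graph_p2(tiles, portals, leny, lenx):
--     graph = {}
--
--     for n in tiles:
--         ns = []
--
--         for pn in [(n[0] + 1, n[1]), (n[0], n[1] - 1),
--                    (n[0] - 1, n[1]), (n[0], n[1] + 1)]:
--
--             if pn in tiles:
--                 ns.append((pn, 0))
--
--         for p in portals.values():
--             if len(p) == 2 and n in p:
--                 if n[0] in [2, leny - 3] or n[1] in [2, lenx - 3]: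
--                     ns.append((p[(p.index(n) + 1) % 2], -1))
--
--                 else:
--                     ns.append((p[(p.index(n) + 1) % 2], 1))
--
--         graph[n] = ns
--
--     return graph
-- ===== SOURCE B (Python) =====
-- def generate_shitty_graph_p2(tiles, portals, leny, lenx):
--     # Scatter formulation: build grid-edge lists per tile in one pass, then
--     # one pass over portals appending the portal edge to each endpoint's list.
--     tileset = set(tiles)
--     graph = {}
--     for n in tiles:
--         y, x = n
--         graph[n] = [(pn, 0) for pn in ((y + 1, x), (y, x - 1), (y - 1, x), (y, x + 1))
--                     if pn in tileset]
--
--     def delta(t):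
--         return -1 if (t[0] in (2, leny - 3) or t[1] in (2, lenx - 3)) else 1
--
--     for p in portals.values():
--         if len(p) != 2:
--             continue
--         a, b = p
--         if a in graph:
--             graph[a].append((b, delta(a)))
--         if b != a and b in graph:
--             graph[b].append((a, delta(b)))
--
--     return graph
-- ===== Notes on version B (the rewrite author's own statement) =====
-- stated objective: faster
-- what changed: Replaces A's per-tile scan over all portals (a nested loop with list.index) by a single scatter pass over portals that appends each portal edge to its two endpoints' adjacency lists, with tile membership precomputed as a set.
import Mathlib
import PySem

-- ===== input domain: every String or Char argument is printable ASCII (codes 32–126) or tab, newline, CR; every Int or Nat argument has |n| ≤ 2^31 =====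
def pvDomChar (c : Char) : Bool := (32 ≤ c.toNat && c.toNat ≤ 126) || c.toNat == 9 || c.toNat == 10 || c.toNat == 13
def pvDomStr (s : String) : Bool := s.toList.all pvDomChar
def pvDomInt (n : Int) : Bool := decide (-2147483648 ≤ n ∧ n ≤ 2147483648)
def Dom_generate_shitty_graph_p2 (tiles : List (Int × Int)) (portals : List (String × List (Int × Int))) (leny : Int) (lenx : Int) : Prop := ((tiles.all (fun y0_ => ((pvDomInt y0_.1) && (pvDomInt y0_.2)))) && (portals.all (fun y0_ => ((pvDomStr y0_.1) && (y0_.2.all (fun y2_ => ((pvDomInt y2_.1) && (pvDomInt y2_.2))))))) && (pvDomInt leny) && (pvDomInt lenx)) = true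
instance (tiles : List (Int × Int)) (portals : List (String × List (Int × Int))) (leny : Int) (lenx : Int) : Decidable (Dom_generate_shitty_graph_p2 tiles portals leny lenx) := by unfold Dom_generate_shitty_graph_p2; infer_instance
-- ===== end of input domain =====

-- B replaces A's per-tile gather over all portals by one scatter pass over the portals (same returned dict, proved below).

-- ===== PORT A =====
-- p[(p.index(n) + 1) % 2]  (A only evaluates this under the guard 'n in p', so index? is some)
def pvOtherA (p : List (Int × Int)) (n : Int × Int) : Int × Int :=
  PySem.List.pyGetD p (PySem.Int.mod ((((PySem.List.index? p n).getD 0 : Nat) : Int) + 1) 2) n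

def generate_shitty_graph_p2 (tiles : List (Int × Int)) (portals : List (String × List (Int × Int))) (leny : Int) (lenx : Int) : List (Int × Int × List ((Int × Int) × Int)) :=
  ((tiles.foldl (fun graph n =>
      let ns : List ((Int × Int) × Int) :=
        ([(n.1 + 1, n.2), (n.1, n.2 - 1), (n.1 - 1, n.2), (n.1, n.2 + 1)]).foldl
          (fun ns pn => if pn ∈ tiles then ns ++ [(pn, (0 : Int))] else ns) []
      let ns := (PySem.Dict.ofList portals).values.foldl
          (fun ns p =>
            if PySem.List.len p = 2 ∧ n ∈ p then
              if n.1 ∈ [2, leny - 3] ∨ n.2 ∈ [2, lenx - 3] then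
                ns ++ [(pvOtherA p n, (-1 : Int))]
              else
                ns ++ [(pvOtherA p n, (1 : Int))]
            else ns) ns
      graph.insert n ns)
    (PySem.Dict.empty : PySem.Dict (Int × Int) (List ((Int × Int) × Int)))).items).map
    (fun kv => (kv.1.1, kv.1.2, kv.2))

-- ===== PORT B =====
def pvDeltaB (leny lenx : Int) (t : Int × Int) : Int :=
  if t.1 ∈ [2, leny - 3] ∨ t.2 ∈ [2, lenx - 3] then -1 else 1

-- one portal of the scatter pass: append the portal edge to each endpoint present in the graph
def pvScatterB (leny lenx : Int) (graph : PySem.Dict (Int × Int) (List ((Int × Int) × Int))) (p : List (Int × Int)) : PySem.Dict (Int × Int) (List ((Int × Int) × Int)) :=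
  match p with
  | [a, b] =>
      let g1 := if graph.contains a then graph.modify a [] (· ++ [(b, pvDeltaB leny lenx a)]) else graph
      if b ≠ a ∧ g1.contains b then g1.modify b [] (· ++ [(a, pvDeltaB leny lenx b)]) else g1
  | _ => graph

def generate_shitty_graph_p2_alt (tiles : List (Int × Int)) (portals : List (String × List (Int × Int))) (leny : Int) (lenx : Int) : List (Int × Int × List ((Int × Int) × Int)) :=
  let tileset := PySem.Set.ofList tiles
  let graph0 := tiles.foldl (fun graph n =>
      graph.insert n
        ((([(n.1 + 1, n.2), (n.1, n.2 - 1), (n.1 - 1, n.2), (n.1, n.2 + 1)]).filter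
            (fun pn => decide (pn ∈ tileset))).map (fun pn => (pn, (0 : Int)))))
    (PySem.Dict.empty : PySem.Dict (Int × Int) (List ((Int × Int) × Int)))
  (((PySem.Dict.ofList portals).values.foldl (pvScatterB leny lenx) graph0).items).map
    (fun kv => (kv.1.1, kv.1.2, kv.2))

-- ===== PRECONDITION & SPEC =====
def Spec_generate_shitty_graph_p2 (tiles : List (Int × Int)) (portals : List (String × List (Int × Int))) (leny : Int) (lenx : Int) (out : List (Int × Int × List ((Int × Int) × Int))) : Prop := out = generate_shitty_graph_p2_alt tiles portals leny lenx
instance (tiles : List (Int × Int)) (portals : List (String × List (Int × Int))) (leny : Int) (lenx : Int) (out : List (Int × Int × List ((Int × Int) × Int))) : Decidable (Spec_generate_shitty_graph_p2 tiles portals leny lenx out) := by unfold Spec_generate_shitty_graph_p2; infer_instance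

-- ===== CLAIM (what is proved, stated in full; the proofs are below) =====
def Claim_equal_generate_shitty_graph_p2 : Prop := ∀ (tiles : List (Int × Int)) (portals : List (String × List (Int × Int))) (leny : Int) (lenx : Int), Dom_generate_shitty_graph_p2 tiles portals leny lenx → Spec_generate_shitty_graph_p2 tiles portals leny lenx (generate_shitty_graph_p2 tiles portals leny lenx)

-- ===== LEMMAS AND PROOFS =====

-- the grid-edge list of tile n (common canonical form of both ports' first pass)
def pvGrid (tiles : List (Int × Int)) (n : Int × Int) : List ((Int × Int) × Int) :=
  (([(n.1 + 1, n.2), (n.1, n.2 - 1), (n.1 - 1, n.2), (n.1, n.2 + 1)]).filter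
    (fun pn => decide (pn ∈ tiles))).map (fun pn => (pn, (0 : Int)))

-- the portal edges A's inner portal loop contributes at tile n for one portal p
def pvContrib (leny lenx : Int) (n : Int × Int) (p : List (Int × Int)) : List ((Int × Int) × Int) :=
  if PySem.List.len p = 2 ∧ n ∈ p then [(pvOtherA p n, pvDeltaB leny lenx n)] else []

-- the full neighbour list A computes for tile n
def pvVal (tiles : List (Int × Int)) (vals : List (List (Int × Int))) (leny lenx : Int) (n : Int × Int) : List ((Int × Int) × Int) :=
  pvGrid tiles n ++ vals.flatMap (pvContrib leny lenx n)

-- a fold inserting a key-determined value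
def pvBuild (v : (Int × Int) → List ((Int × Int) × Int)) (tiles : List (Int × Int)) (d : PySem.Dict (Int × Int) (List ((Int × Int) × Int))) : PySem.Dict (Int × Int) (List ((Int × Int) × Int)) :=
  tiles.foldl (fun g n => g.insert n (v n)) d

lemma pvBuild_getD (v : (Int × Int) → List ((Int × Int) × Int)) (tiles : List (Int × Int)) (d : PySem.Dict (Int × Int) (List ((Int × Int) × Int))) (k : Int × Int) :
    (pvBuild v tiles d).getD k [] = if k ∈ tiles then v k else d.getD k [] := by
  induction tiles generalizing d with
  | nil => simp [pvBuild]
  | cons t rest ih =>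
      simp only [pvBuild, List.foldl_cons] at *
      rw [ih]
      by_cases hk : k ∈ rest
      · simp [hk]
      · by_cases hkt : k = t
        · simp [hkt]
        · simp [hk, hkt, PySem.Dict.getD_insert, List.mem_cons]

lemma pvBuild_keys (v : (Int × Int) → List ((Int × Int) × Int)) (tiles : List (Int × Int)) (d : PySem.Dict (Int × Int) (List ((Int × Int) × Int))) :
    (pvBuild v tiles d).keys = PySem.Set.update d.keys tiles := by
  simpa [pvBuild] using PySem.Dict.keys_foldl_insert tiles (fun _ n => v n) d

-- A's grid loop at tile n is the filter-map pvGrid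
lemma pvGridA_eq (tiles : List (Int × Int)) (n : Int × Int) :
    ([(n.1 + 1, n.2), (n.1, n.2 - 1), (n.1 - 1, n.2), (n.1, n.2 + 1)]).foldl
      (fun ns pn => if pn ∈ tiles then ns ++ [(pn, (0 : Int))] else ns) []
    = pvGrid tiles n := by
  simp only [pvGrid, List.foldl_cons, List.foldl_nil, List.filter_cons, List.filter_nil,
    decide_eq_true_eq]
  split_ifs <;> simp

-- A's portal loop appends exactly pvContrib for each portal
lemma pvPortalA_eq (leny lenx : Int) (n : Int × Int) (vals : List (List (Int × Int))) (ns : List ((Int × Int) × Int)) :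
    vals.foldl
      (fun ns p =>
        if PySem.List.len p = 2 ∧ n ∈ p then
          if n.1 ∈ [2, leny - 3] ∨ n.2 ∈ [2, lenx - 3] then
            ns ++ [(pvOtherA p n, (-1 : Int))]
          else
            ns ++ [(pvOtherA p n, (1 : Int))]
        else ns) ns
    = ns ++ vals.flatMap (pvContrib leny lenx n) := by
  have h : (fun (ns : List ((Int × Int) × Int)) p =>
        if PySem.List.len p = 2 ∧ n ∈ p then
          if n.1 ∈ [2, leny - 3] ∨ n.2 ∈ [2, lenx - 3] then
            ns ++ [(pvOtherA p n, (-1 : Int))]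
          else
            ns ++ [(pvOtherA p n, (1 : Int))]
        else ns)
      = fun ns p => ns ++ pvContrib leny lenx n p := by
    funext ns p
    simp only [pvContrib, pvDeltaB]
    split_ifs <;> simp
  rw [h, PySem.List.foldl_append_eq_flatMap]

-- A in canonical form
lemma pvA_canon (tiles : List (Int × Int)) (portals : List (String × List (Int × Int))) (leny lenx : Int) :
    generate_shitty_graph_p2 tiles portals leny lenx
    = ((pvBuild (pvVal tiles (PySem.Dict.ofList portals).values leny lenx) tiles PySem.Dict.empty).items).map
        (fun kv => (kv.1.1, kv.1.2, kv.2)) := by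
  unfold generate_shitty_graph_p2 pvBuild
  congr 1
  congr 1
  refine PySem.List.foldl_congr_mem tiles _ _ _ (fun g n _ => ?_)
  simp only [pvGridA_eq, pvPortalA_eq, pvVal]

-- B in canonical form
lemma pvB_canon (tiles : List (Int × Int)) (portals : List (String × List (Int × Int))) (leny lenx : Int) :
    generate_shitty_graph_p2_alt tiles portals leny lenx
    = (((PySem.Dict.ofList portals).values.foldl (pvScatterB leny lenx)
          (pvBuild (pvGrid tiles) tiles PySem.Dict.empty)).items).map
        (fun kv => (kv.1.1, kv.1.2, kv.2)) := by
  unfold generate_shitty_graph_p2_alt pvBuild pvGrid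
  have hset : (fun pn : Int × Int => decide (pn ∈ PySem.Set.ofList tiles))
      = (fun pn : Int × Int => decide (pn ∈ tiles)) := by
    funext pn; simp [PySem.Set.mem_ofList]
  simp only [hset]

-- pvScatterB preserves keys
lemma pvScatter_keys (leny lenx : Int) (d : PySem.Dict (Int × Int) (List ((Int × Int) × Int))) (p : List (Int × Int)) :
    (pvScatterB leny lenx d p).keys = d.keys := by
  have hm : ∀ (e : (Int × Int) × Int) (k : Int × Int), d.contains k = true →
      (d.modify k [] (· ++ [e])).keys = d.keys := fun e k h => by
    rw [PySem.Dict.keys_modify, PySem.Dict.keys_insert_of_contains _ _ h]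
  match p with
  | [] => rfl
  | [a] => rfl
  | (a :: b :: c :: r) => rfl
  | [a, b] =>
      simp only [pvScatterB]
      by_cases ha : d.contains a = true
      · rw [if_pos ha]
        by_cases hb : b ≠ a ∧ (d.modify a [] (· ++ [(b, pvDeltaB leny lenx a)])).contains b = true
        · rw [if_pos hb]
          have hdb : d.contains b = true := by
            have h2 := hb.2
            rw [PySem.Dict.contains_modify] at h2
            simpa [hb.1] using h2
          have hc2 : (d.modify a [] (· ++ [(b, pvDeltaB leny lenx a)])).contains b = true := hb.2
          calc ((d.modify a [] (· ++ [(b, pvDeltaB leny lenx a)])).modify b []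
                  (· ++ [(a, pvDeltaB leny lenx b)])).keys
              = (d.modify a [] (· ++ [(b, pvDeltaB leny lenx a)])).keys := by
                rw [PySem.Dict.keys_modify, PySem.Dict.keys_insert_of_contains _ _ hc2]
            _ = d.keys := hm _ _ ha
        · rw [if_neg hb]; exact hm _ _ ha
      · rw [if_neg ha]
        by_cases hb : b ≠ a ∧ d.contains b = true
        · rw [if_pos hb]; exact hm _ _ hb.2
        · rw [if_neg hb]

lemma pvScatter_fold_keys (leny lenx : Int) (ps : List (List (Int × Int))) (d : PySem.Dict (Int × Int) (List ((Int × Int) × Int))) :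
    (ps.foldl (pvScatterB leny lenx) d).keys = d.keys := by
  induction ps generalizing d with
  | nil => rfl
  | cons p rest ih => rw [List.foldl_cons, ih, pvScatter_keys]

lemma pvOtherA_left (a b : Int × Int) : pvOtherA [a, b] a = b := by
  have h : PySem.List.index? [a, b] a = some 0 := by
    simp [PySem.List.index?, List.idxOf?, List.findIdx?, List.findIdx?.go]
  rw [pvOtherA, h]
  norm_num [PySem.Int.mod, Int.fmod_eq_emod, PySem.List.pyGetD, PySem.List.pyGet?,
    PySem.List.pyIdx?]

lemma pvOtherA_right (a b : Int × Int) (h : b ≠ a) : pvOtherA [a, b] b = a := by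
  have h1 : PySem.List.index? [a, b] b = some 1 := by
    simp [PySem.List.index?, List.idxOf?, List.findIdx?, List.findIdx?.go, Ne.symm h]
  rw [pvOtherA, h1]
  norm_num [PySem.Int.mod, Int.fmod_eq_emod, PySem.List.pyGetD, PySem.List.pyGet?,
    PySem.List.pyIdx?]

lemma pvContrib_pair (leny lenx : Int) (n a b : Int × Int) :
    pvContrib leny lenx n [a, b]
    = if n = a then [(b, pvDeltaB leny lenx n)]
      else if n = b then [(a, pvDeltaB leny lenx n)] else [] := by
  by_cases hna : n = a
  · subst hna
    simp [pvContrib, PySem.List.len_eq, pvOtherA_left]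
  · by_cases hnb : n = b
    · subst hnb
      simp [pvContrib, PySem.List.len_eq, hna, pvOtherA_right a n hna]
    · simp [pvContrib, hna, hnb]

-- one scatter step appends exactly A's per-portal contribution at every present key
lemma pvScatter_getD (leny lenx : Int) (d : PySem.Dict (Int × Int) (List ((Int × Int) × Int))) (p : List (Int × Int)) (n : Int × Int) :
    (pvScatterB leny lenx d p).getD n []
    = d.getD n [] ++ (if d.contains n then pvContrib leny lenx n p else []) := by
  match p with
  | [] =>
      have hc : pvContrib leny lenx n [] = [] := by
        unfold pvContrib
        rw [if_neg (fun h => by simp [PySem.List.len_eq] at h)]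
      simp only [pvScatterB, hc]
      split <;> simp
  | [a] =>
      have hc : pvContrib leny lenx n [a] = [] := by
        unfold pvContrib
        refine if_neg (fun h => ?_)
        have := h.1
        simp only [PySem.List.len_eq, List.length_cons, List.length_nil] at this
        omega
      simp only [pvScatterB, hc]
      split <;> simp
  | (a :: b :: c :: r) =>
      have hc : pvContrib leny lenx n (a :: b :: c :: r) = [] := by
        unfold pvContrib
        refine if_neg (fun h => ?_)
        have := h.1
        simp only [PySem.List.len_eq, List.length_cons] at this
        push_cast at this
        omega
      simp only [pvScatterB, hc]
      split <;> simp
  | [a, b] =>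
      rw [pvContrib_pair]
      simp only [pvScatterB]
      by_cases hna : n = a <;> by_cases hnb : n = b <;>
        by_cases ha : d.contains a = true <;> by_cases hb : d.contains b = true <;>
        by_cases hba : b = a <;>
        simp_all [PySem.Dict.getD_modify, PySem.Dict.contains_modify]

lemma pvScatter_fold_getD (leny lenx : Int) (ps : List (List (Int × Int))) (d : PySem.Dict (Int × Int) (List ((Int × Int) × Int))) (n : Int × Int) :
    (ps.foldl (pvScatterB leny lenx) d).getD n []
    = d.getD n [] ++ (if d.contains n then ps.flatMap (pvContrib leny lenx n) else []) := by
  induction ps generalizing d with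
  | nil => by_cases h : d.contains n <;> simp [h]
  | cons p rest ih =>
      rw [List.foldl_cons, ih, pvScatter_getD]
      have hc : (pvScatterB leny lenx d p).contains n = d.contains n := by
        rw [PySem.Dict.contains_eq_decide_mem_keys, PySem.Dict.contains_eq_decide_mem_keys,
          pvScatter_keys]
      rw [hc]
      by_cases h : d.contains n <;> simp [h]

-- ===== VERDICT (by name: the statement is the Claim_ definition above) =====
theorem generate_shitty_graph_p2_spec : Claim_equal_generate_shitty_graph_p2 := by
  intro tiles portals leny lenx _
  unfold Spec_generate_shitty_graph_p2
  rw [pvA_canon, pvB_canon]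
  congr 1
  have hkeys0 : (pvBuild (pvGrid tiles) tiles PySem.Dict.empty).keys
      = PySem.Set.update (PySem.Dict.empty (κ := Int × Int) (ν := List ((Int × Int) × Int))).keys tiles :=
    pvBuild_keys _ _ _
  have hnd1 : (pvBuild (pvVal tiles (PySem.Dict.ofList portals).values leny lenx) tiles PySem.Dict.empty).keys.Nodup := by
    unfold pvBuild
    exact PySem.Dict.nodup_keys_foldl_insert _ _ _ PySem.Dict.nodup_keys_empty
  have hkeys1 : (pvBuild (pvVal tiles (PySem.Dict.ofList portals).values leny lenx) tiles PySem.Dict.empty).keys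
      = (pvBuild (pvGrid tiles) tiles PySem.Dict.empty).keys := by
    rw [pvBuild_keys, hkeys0]
  have hkeys2 : ((PySem.Dict.ofList portals).values.foldl (pvScatterB leny lenx)
        (pvBuild (pvGrid tiles) tiles PySem.Dict.empty)).keys
      = (pvBuild (pvVal tiles (PySem.Dict.ofList portals).values leny lenx) tiles PySem.Dict.empty).keys := by
    rw [pvScatter_fold_keys, hkeys1]
  have hnd2 : ((PySem.Dict.ofList portals).values.foldl (pvScatterB leny lenx)
        (pvBuild (pvGrid tiles) tiles PySem.Dict.empty)).keys.Nodup := by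
    rw [hkeys2]; exact hnd1
  rw [PySem.Dict.items_eq_map_keys _ hnd1 [], PySem.Dict.items_eq_map_keys _ hnd2 [], hkeys2]
  refine List.map_congr_left (fun k _ => ?_)
  have hcont : (pvBuild (pvGrid tiles) tiles PySem.Dict.empty).contains k = decide (k ∈ tiles) := by
    rw [PySem.Dict.contains_eq_decide_mem_keys, hkeys0]
    by_cases hk : k ∈ tiles <;> simp [PySem.Set.mem_update, hk]
  rw [pvScatter_fold_getD, pvBuild_getD, pvBuild_getD, hcont]
  by_cases hk : k ∈ tiles <;> simp [hk, pvVal]
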